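-- pv_equiv track=rewrite | github.com/igorol/advent_of_code | 2022/10/main.py | fill_signal
-- ===== SOURCE A (Python) =====
-- def fill_signal(data):
--     signal = {(cycle_id := 1): 1}
--     for line in data:
--         num_cycles = len(line := line.split())
--         for instruc in line:
--             cycle_id += 1
--             increment = int(instruc) if instruc.lstrip("-").isnumeric() else 0
--             signal[cycle_id] = int(signal[cycle_id - 1]) + increment
--     return signal
-- ===== SOURCE B (Python) =====
-- def fill_signal(data):
--     tokens = [t for line in data for t in line.split()]
--     incs = [int(t) if t.lstrip("-").isnumeric() else 0 for t in tokens]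
--     total = 1 + sum(incs)
--     pairs = []
--     for i, inc in reversed(list(enumerate(incs))):
--         pairs.append((i + 2, total))
--         total -= inc
--     pairs.append((1, 1))
--     return dict(reversed(pairs))
-- ===== Notes on version B (the rewrite author's own statement) =====
-- stated objective: alternative
-- what changed: A threads a growing dict and cycle counter forward, each value derived from the previous key's entry; B computes the grand total of all increments once, then walks the tokens in REVERSE, emitting (cycle, value) pairs back-to-front by subtracting each increment from a running suffix total, and reverses the pair list at the end.
import Mathlib
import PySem

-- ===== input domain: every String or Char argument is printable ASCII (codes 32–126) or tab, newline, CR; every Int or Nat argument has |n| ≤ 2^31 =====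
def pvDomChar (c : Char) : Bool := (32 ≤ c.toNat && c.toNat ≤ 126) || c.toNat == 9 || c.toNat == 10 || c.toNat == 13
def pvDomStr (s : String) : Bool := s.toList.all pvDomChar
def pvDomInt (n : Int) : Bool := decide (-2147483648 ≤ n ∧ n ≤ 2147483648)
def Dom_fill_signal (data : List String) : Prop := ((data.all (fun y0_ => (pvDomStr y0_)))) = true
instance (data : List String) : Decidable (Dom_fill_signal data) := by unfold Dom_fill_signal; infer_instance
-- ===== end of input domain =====

-- B replaces A's forward dict-threaded accumulation by: total of all increments once, then a
-- REVERSE walk emitting (cycle, value) pairs back-to-front via suffix subtraction (alternative, same cost).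

-- ===== PORT A =====
-- instruc.lstrip("-").isnumeric(): ported by hand as dropWhile of '-' (Python lstrip("-")
-- removes exactly the leading '-' run) followed by Chars.strIsdigit, which on the printable
-- ASCII domain coincides with str.isnumeric.
def pvIncA (instruc : String) : Int :=
  if PySem.Chars.strIsdigit (instruc.toList.dropWhile (· == '-')) then
    (PySem.Int.ofStr? instruc).getD 0   -- int(instruc); Pre_ guarantees this parse succeeds
  else 0

-- one iteration of A's inner loop: state = (cycle_id, signal)
def pvStepA (st : Int × PySem.Dict Int Int) (instruc : String) : Int × PySem.Dict Int Int :=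
  let cycle_id := st.1 + 1
  let increment := pvIncA instruc
  -- signal[cycle_id - 1] always exists (keys 1..cycle_id-1 are present); int() of an int is the int
  (cycle_id, st.2.insert cycle_id (st.2.getD (cycle_id - 1) 0 + increment))

def fill_signal (data : List String) : List (Int × Int) :=
  (data.foldl (fun st line => (PySem.Str.split₀ line).foldl pvStepA st)
    (1, PySem.Dict.empty.insert 1 1)).2.items

-- ===== PORT B =====
-- same hand-ported numeric test as A's (it is the same expression in both Pythons)
def pvIncB (t : String) : Int :=
  if PySem.Chars.strIsdigit (t.toList.dropWhile (· == '-')) then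
    (PySem.Int.ofStr? t).getD 0
  else 0

-- one iteration of B's reverse loop: state = (total, pairs)
def pvStepB (acc : Int × List (Int × Int)) (p : Int × Int) : Int × List (Int × Int) :=
  (acc.1 - p.2, acc.2 ++ [(p.1 + 2, acc.1)])

def fill_signal_alt (data : List String) : List (Int × Int) :=
  let tokens := data.flatMap (fun line => PySem.Str.split₀ line)
  let incs := tokens.map pvIncB
  let st := ((PySem.List.enumerate incs 0).reverse).foldl pvStepB (1 + incs.sum, [])
  (PySem.Dict.ofList (st.2 ++ [((1 : Int), (1 : Int))]).reverse).items

-- ===== PRECONDITION & SPEC =====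
-- Pre_ excludes exactly the inputs where A raises ValueError: a token that is two or more
-- leading '-' followed only by digits passes the isnumeric test but int() fails on it.
def Pre_fill_signal (data : List String) : Prop :=
  ∀ line ∈ data, ∀ t ∈ PySem.Str.split₀ line,
    PySem.Chars.strIsdigit (t.toList.dropWhile (· == '-')) = true →
    t.toList.take 2 ≠ ['-', '-']
instance (data : List String) : Decidable (Pre_fill_signal data) := by
  unfold Pre_fill_signal; infer_instance

def pvWitness_fill_signal : List String := ["noop", "addx 3", "addx -5"]

def Spec_fill_signal (data : List String) (out : List (Int × Int)) : Prop := out = fill_signal_alt data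
instance (data : List String) (out : List (Int × Int)) : Decidable (Spec_fill_signal data out) := by unfold Spec_fill_signal; infer_instance

-- ===== CLAIM (what is proved, stated in full; the proofs are below) =====
def Claim_equal_fill_signal : Prop := ∀ (data : List String), Dom_fill_signal data → Pre_fill_signal data → Spec_fill_signal data (fill_signal data)

-- ===== LEMMAS AND PROOFS =====

-- prefix sums of xs starting from running total t
def pvSums (t : Int) : List Int → List Int
  | [] => []
  | x :: xs => (t + x) :: pvSums (t + x) xs

-- A's nested loops = one fold over the flattened token list
theorem pvFlattenA (data : List String) (s : Int × PySem.Dict Int Int) :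
    data.foldl (fun st line => (PySem.Str.split₀ line).foldl pvStepA st) s
      = (data.flatMap (fun line => PySem.Str.split₀ line)).foldl pvStepA s := by
  induction data generalizing s with
  | nil => simp
  | cons l ls ih => simp [List.flatMap_cons, List.foldl_append, ih]

-- invariant for A's token loop
theorem pvLoopA (toks : List String) (c : Int) (d : PySem.Dict Int Int) (v : Int)
    (hk : ∀ k ∈ d.keys, k ≤ c) (hv : d.getD c 0 = v) :
    ((toks.foldl pvStepA (c, d)).2).items
      = d.items ++ PySem.List.enumerate (pvSums v (toks.map pvIncA)) (c + 1) := by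
  induction toks generalizing c d v with
  | nil => simp [pvSums, PySem.List.enumerate_nil]
  | cons x xs ih =>
    have hfresh : d.contains (c + 1) = false := by
      by_contra h
      have : (c + 1) ∈ d.keys := by
        rw [← PySem.Dict.contains_iff_mem_keys]
        simpa using h
      have := hk _ this
      omega
    have hstep : pvStepA (c, d) x = (c + 1, d.insert (c + 1) (v + pvIncA x)) := by
      simp [pvStepA, hv]
    rw [List.foldl_cons, hstep,
      ih (c + 1) (d.insert (c + 1) (v + pvIncA x)) (v + pvIncA x)
        (by
          intro k hkmem
          rcases (PySem.Dict.mem_keys_insert _ _ _ _).1 hkmem with h | h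
          · omega
          · have := hk _ h; omega)
        (by simp),
      PySem.Dict.items_insert_of_not_contains _ _ hfresh]
    simp [pvSums, PySem.List.enumerate_cons]

-- B's reverse walk: starting from v + sum incs, it lays down the prefix sums of incs, reversed
theorem pvLoopB (incs : List Int) (v k : Int) (l : List (Int × Int)) :
    (((PySem.List.enumerate incs k).reverse).foldl pvStepB (v + incs.sum, l))
      = (v, l ++ (PySem.List.enumerate (pvSums v incs) (k + 2)).reverse) := by
  induction incs generalizing v k l with
  | nil => simp [pvSums, PySem.List.enumerate_nil]
  | cons x xs ih =>
    rw [PySem.List.enumerate_cons, List.reverse_cons, List.foldl_append]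
    have : v + (x :: xs).sum = (v + x) + xs.sum := by simp; ring
    rw [this, ih (v + x) (k + 1) l]
    simp [pvStepB, pvSums, PySem.List.enumerate_cons]
    ring_nf

-- Dict.ofList over pairs with strictly increasing keys keeps the list as its items
theorem pvItemsOfEnum (vals : List Int) (s : Int) :
    (PySem.Dict.ofList (PySem.List.enumerate vals s)).items
      = PySem.List.enumerate vals s := by
  have h :=
    PySem.Dict.items_foldl_insert_fresh (PySem.List.enumerate vals s)
      Prod.fst Prod.snd PySem.Dict.empty
      (by intro a _; simp)
      (by
        have := PySem.List.pairwise_lt_enumerate vals s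
        have hp : (List.map Prod.fst (PySem.List.enumerate vals s)).Pairwise (· < ·) := by
          rw [List.pairwise_map]; exact this
        exact hp.imp fun h => ne_of_lt h)
  simpa using h

theorem pvIncAB : pvIncA = pvIncB := rfl

-- ===== VERDICT (by name: the statement is the Claim_ definition above) =====
theorem fill_signal_spec : Claim_equal_fill_signal := by
  intro data _ _
  unfold Spec_fill_signal fill_signal fill_signal_alt
  rw [pvFlattenA, pvLoopA _ 1 _ 1 (by intro k hk; simp [PySem.Dict.mem_keys_insert] at hk; omega)
    (by simp)]
  dsimp only
  rw [pvLoopB _ 1 0 []]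
  dsimp only
  rw [List.nil_append, List.reverse_append, List.reverse_reverse, List.reverse_singleton]
  have hone : ((1 : Int), (1 : Int)) :: PySem.List.enumerate (pvSums 1 ((data.flatMap fun line => PySem.Str.split₀ line).map pvIncB)) (0 + 2)
      = PySem.List.enumerate (1 :: pvSums 1 ((data.flatMap fun line => PySem.Str.split₀ line).map pvIncB)) 1 := by
    rw [PySem.List.enumerate_cons]; norm_num
  rw [List.singleton_append, hone, pvItemsOfEnum, ← pvIncAB]
  have hemp : (PySem.Dict.empty : PySem.Dict Int Int).items = [] := rfl
  rw [PySem.Dict.items_insert_of_not_contains _ _ (by simp), hemp]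
  simp [PySem.List.enumerate_cons]
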